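-- pv_equiv track=rewrite | github.com/palfibogdan/FActScore | factscore/data_utils.py | get_selfcheck_topic
-- ===== SOURCE A (Python) =====
-- def get_selfcheck_topic(dp):
--     concept = ""
--     mid_names = ["of", "de", "van", "von", "the", "The"]
--     concept_list = dp["wiki_bio_text"].split(" ")
--     for string in concept_list:
--         if string in mid_names or string.isupper() or string[0].isupper():
--             if string[0] != "(":
--                 concept += string + " "
--         else:
--             break
--
--     return concept.strip()
-- ===== SOURCE B (Python) =====
-- def get_selfcheck_topic(dp):
--     # single character-level scan: build each word on the fly instead of splitting the text first
--     mid_names = {"of", "de", "van", "von", "the", "The"}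
--     parts = []
--     word = ""
--     stopped = False
--     for ch in dp["wiki_bio_text"]:
--         if ch != " ":
--             word += ch
--             continue
--         if word in mid_names or word.isupper() or word[0].isupper():
--             if word[0] != "(":
--                 parts.append(word)
--             word = ""
--         else:
--             stopped = True
--             break
--     if not stopped:
--         if word in mid_names or word.isupper() or word[0].isupper():
--             if word[0] != "(":
--                 parts.append(word)
--     return " ".join(parts).strip()
-- ===== Notes on version B (the rewrite author's own statement) =====
-- stated objective: alternative
-- what changed: A splits the text into a word list and runs a fused accumulate/skip/break loop over it; B never splits: it is a character-level scan that builds each word incrementally, flushes kept words into a list at each space, records whether the scan was cut short, handles the final word after the loop, and joins at the end.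
import Mathlib
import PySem

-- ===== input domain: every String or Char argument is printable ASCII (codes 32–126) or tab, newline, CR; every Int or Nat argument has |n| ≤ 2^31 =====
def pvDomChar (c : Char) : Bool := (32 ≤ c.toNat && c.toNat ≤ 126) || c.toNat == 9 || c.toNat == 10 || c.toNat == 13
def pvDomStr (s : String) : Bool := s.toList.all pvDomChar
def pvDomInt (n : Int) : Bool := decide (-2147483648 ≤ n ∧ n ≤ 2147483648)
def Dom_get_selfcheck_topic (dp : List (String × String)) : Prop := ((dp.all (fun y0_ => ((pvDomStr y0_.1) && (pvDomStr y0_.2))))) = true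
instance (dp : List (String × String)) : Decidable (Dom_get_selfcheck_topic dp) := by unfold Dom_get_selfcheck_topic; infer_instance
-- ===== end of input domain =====

-- B replaces A's split-then-fused-loop by a character-level scan that builds each word on the fly (objective: alternative algorithm, no speed claim).

def pvMid : List String := ["of", "de", "van", "von", "the", "The"]

-- Python str.isupper(): at least one cased character and no lowercase one (exact on the ASCII domain)
def pvStrIsupper (s : String) : Bool :=
  s.toList.any PySem.Chars.isalpha && s.toList.all (fun c => !PySem.Chars.islower c)

-- the word test 'w in mid_names or w.isupper() or w[0].isupper()', written inline in both Pythons;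
-- the none branch (empty word, Python's IndexError on w[0]) is excluded by Pre_
def pvPred (w : String) : Bool :=
  pvMid.contains w || pvStrIsupper w ||
    (match PySem.Str.pyGet? w 0 with | some c => PySem.Chars.isupper c | none => false)

-- 'w[0] != "("' (safe: only reached on words whose predicate already read w[0])
def pvNotParen (w : String) : Bool := PySem.Str.pyGet? w 0 != some '('

-- ===== PORT A =====
def pvALoop : List String → List Char → List Char
  | [], acc => acc
  | w :: rest, acc =>
    if pvPred w then
      if pvNotParen w then pvALoop rest (acc ++ w.toList ++ [' ']) else pvALoop rest acc
    else acc

def get_selfcheck_topic (dp : List (String × String)) : String :=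
  match (PySem.Dict.mk dp).get? "wiki_bio_text" with
  | none => ""   -- Python raises KeyError here; outside Pre_
  | some s =>
    let concept_list := (PySem.Str.split? s " ").getD []
    PySem.Str.strip (String.ofList (pvALoop concept_list []))

-- ===== PORT B =====
-- the char loop: state = (current word, kept words); returns (kept words, some leftover-word)
-- on normal loop exit, (kept words, none) when the 'break' fired ('stopped = True')
def pvBGo : List Char → List Char → List String → List String × Option (List Char)
  | [], word, parts => (parts, some word)
  | c :: cs, word, parts =>
    if c ≠ ' ' then pvBGo cs (word ++ [c]) parts
    else if pvPred (String.ofList word) then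
      if pvNotParen (String.ofList word) then pvBGo cs [] (parts ++ [String.ofList word])
      else pvBGo cs [] parts
    else (parts, none)

-- the post-loop 'if not stopped: …' final-word step
def pvBFinish : List String × Option (List Char) → List String
  | (parts, none) => parts
  | (parts, some word) =>
    if pvPred (String.ofList word) then
      if pvNotParen (String.ofList word) then parts ++ [String.ofList word] else parts
    else parts

def get_selfcheck_topic_alt (dp : List (String × String)) : String :=
  match (PySem.Dict.mk dp).get? "wiki_bio_text" with
  | none => ""   -- Python raises KeyError here; outside Pre_
  | some s =>
    PySem.Str.strip (PySem.Str.join " " (pvBFinish (pvBGo s.toList [] [])))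

-- ===== PRECONDITION & SPEC =====
-- Pre_ excludes exactly the inputs where the Python A raises: a missing "wiki_bio_text" key (KeyError),
-- and texts whose first word failing the capitalization test is empty (IndexError on string[0]).
def Pre_get_selfcheck_topic (dp : List (String × String)) : Prop :=
  (PySem.Dict.mk dp).contains "wiki_bio_text" = true ∧
  (((((PySem.Str.split? (((PySem.Dict.mk dp).get? "wiki_bio_text").getD "") " ").getD []).dropWhile pvPred).head?) ≠ some "")
instance (dp : List (String × String)) : Decidable (Pre_get_selfcheck_topic dp) := by unfold Pre_get_selfcheck_topic; infer_instance

def pvWitness_get_selfcheck_topic : (List (String × String)) :=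
  [("wiki_bio_text", "John von Neumann (b. 1903) was a mathematician")]

def Spec_get_selfcheck_topic (dp : List (String × String)) (out : String) : Prop := out = get_selfcheck_topic_alt dp
instance (dp : List (String × String)) (out : String) : Decidable (Spec_get_selfcheck_topic dp out) := by unfold Spec_get_selfcheck_topic; infer_instance

-- ===== CLAIM (what is proved, stated in full; the proofs are below) =====
def Claim_equal_get_selfcheck_topic : Prop := ∀ (dp : List (String × String)), Dom_get_selfcheck_topic dp → Pre_get_selfcheck_topic dp → Spec_get_selfcheck_topic dp (get_selfcheck_topic dp)

-- ===== LEMMAS AND PROOFS =====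

-- split on a single space, recursively (the reference both loops are reduced to)
def pvSplitSp : List Char → List (List Char)
  | [] => [[]]
  | c :: rest =>
    if c = ' ' then [] :: pvSplitSp rest
    else
      match pvSplitSp rest with
      | [] => [[c]]
      | w :: ws => (c :: w) :: ws

theorem pvSplitSp_ne_nil (l : List Char) : pvSplitSp l ≠ [] := by
  cases l with
  | nil => simp [pvSplitSp]
  | cons c rest =>
    by_cases h : c = ' '
    · simp [pvSplitSp, h]
    · simp only [pvSplitSp, if_neg h]
      cases pvSplitSp rest <;> simp

theorem pvSplitSp_no_space (w : List Char) (h : ' ' ∉ w) : pvSplitSp w = [w] := by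
  induction w with
  | nil => rfl
  | cons c rest ih =>
    have hc : c ≠ ' ' := fun hc => h (hc ▸ List.mem_cons_self)
    have hr : ' ' ∉ rest := fun hm => h (List.mem_cons_of_mem _ hm)
    simp [pvSplitSp, hc, ih hr]

theorem pvSplitSp_append (w cs : List Char) (h : ' ' ∉ w) :
    pvSplitSp (w ++ ' ' :: cs) = w :: pvSplitSp cs := by
  induction w with
  | nil => simp [pvSplitSp]
  | cons c rest ih =>
    have hc : c ≠ ' ' := fun hc => h (hc ▸ List.mem_cons_self)
    have hr : ' ' ∉ rest := fun hm => h (List.mem_cons_of_mem _ hm)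
    simp [pvSplitSp, hc, ih hr]

-- PySem's fueled splitter agrees with pvSplitSp for the single-space separator
theorem pvGo_spec (fuel : Nat) : ∀ (l cur : List Char) (acc : List (List Char)),
    l.length ≤ fuel →
    PySem.Chars.splitOn.go [' '] fuel l cur acc
      = acc.reverse ++ (pvSplitSp l).modifyHead (cur.reverse ++ ·) := by
  induction fuel with
  | zero =>
    intro l cur acc hl
    have : l = [] := List.eq_nil_of_length_eq_zero (Nat.le_zero.mp hl)
    subst this
    simp [PySem.Chars.splitOn.go, pvSplitSp]
  | succ fuel ih =>
    intro l cur acc hl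
    cases l with
    | nil => simp [PySem.Chars.splitOn.go, pvSplitSp]
    | cons c rest =>
      simp only [List.length_cons, Nat.succ_le_succ_iff] at hl
      by_cases hc : c = ' '
      · subst hc
        have hpref : [' '].isPrefixOf (' ' :: rest) = true := by simp [List.isPrefixOf]
        rw [PySem.Chars.splitOn.go, if_pos hpref]
        simp only [List.length_singleton, List.drop_one, List.tail_cons]
        rw [ih rest [] _ hl]
        cases hsp : pvSplitSp rest with
        | nil => exact absurd hsp (pvSplitSp_ne_nil rest)
        | cons w ws => simp [pvSplitSp, hsp]
      · have hpref : [' '].isPrefixOf (c :: rest) = false := by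
          simp [List.isPrefixOf]; exact fun h => absurd h.symm hc
        rw [PySem.Chars.splitOn.go, if_neg (by simp [hpref])]
        rw [ih rest (c :: cur) acc hl]
        cases hsp : pvSplitSp rest with
        | nil => exact absurd hsp (pvSplitSp_ne_nil rest)
        | cons w ws => simp [pvSplitSp, hc, hsp]

theorem pvSplitOn_eq (l : List Char) : PySem.Chars.splitOn l [' '] = pvSplitSp l := by
  rw [PySem.Chars.splitOn, pvGo_spec (l.length + 1) l [] [] (Nat.le_succ _)]
  cases hsp : pvSplitSp l with
  | nil => exact absurd hsp (pvSplitSp_ne_nil l)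
  | cons w ws => simp

-- the words both programs keep: the leading pvPred-run, minus parenthesized words
def pvKept (ws : List (List Char)) : List (List Char) :=
  (ws.takeWhile (fun w => pvPred (String.ofList w))).filter (fun w => pvNotParen (String.ofList w))

-- B's whole run (char loop + final-word step) collects exactly the kept words
theorem pvBGo_spec (s : List Char) : ∀ (word : List Char) (parts : List String), ' ' ∉ word →
    pvBFinish (pvBGo s word parts) = parts ++ (pvKept (pvSplitSp (word ++ s))).map String.ofList := by
  induction s with
  | nil =>
    intro word parts hw
    rw [List.append_nil, pvSplitSp_no_space word hw]
    by_cases hp : pvPred (String.ofList word) = true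
    · by_cases hq : pvNotParen (String.ofList word) = true
      · simp [pvBGo, pvBFinish, pvKept, hp, hq]
      · simp only [Bool.not_eq_true] at hq
        simp [pvBGo, pvBFinish, pvKept, hp, hq]
    · simp only [Bool.not_eq_true] at hp
      simp [pvBGo, pvBFinish, pvKept, hp]
  | cons c cs ih =>
    intro word parts hw
    by_cases hc : c = ' '
    · subst hc
      rw [pvSplitSp_append word cs hw]
      by_cases hp : pvPred (String.ofList word) = true
      · by_cases hq : pvNotParen (String.ofList word) = true
        · rw [show pvBGo (' ' :: cs) word parts
                = pvBGo cs [] (parts ++ [String.ofList word]) by simp [pvBGo, hp, hq]]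
          rw [ih [] _ (by simp)]
          simp [pvKept, hp, hq]
        · simp only [Bool.not_eq_true] at hq
          rw [show pvBGo (' ' :: cs) word parts = pvBGo cs [] parts by simp [pvBGo, hp, hq]]
          rw [ih [] _ (by simp)]
          simp [pvKept, hp, hq]
      · simp only [Bool.not_eq_true] at hp
        simp [pvBGo, pvBFinish, hp, pvKept]
    · have hw' : ' ' ∉ word ++ [c] := by
        intro hm
        rcases List.mem_append.mp hm with h | h
        · exact hw h
        · exact hc (List.mem_singleton.mp h).symm
      rw [show pvBGo (c :: cs) word parts = pvBGo cs (word ++ [c]) parts by simp [pvBGo, hc]]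
      rw [ih (word ++ [c]) parts hw']
      simp

-- A's loop collects the same kept words, as chunks '<word> '
def pvChunks (l : List String) : List Char := l.flatMap (fun w => w.toList ++ [' '])

theorem pvALoop_eq (ws : List String) (acc : List Char) :
    pvALoop ws acc = acc ++ pvChunks ((ws.takeWhile pvPred).filter pvNotParen) := by
  induction ws generalizing acc with
  | nil => simp [pvALoop, pvChunks]
  | cons w rest ih =>
    by_cases h : pvPred w = true
    · by_cases hp : pvNotParen w = true
      · simp [pvALoop, h, hp, pvChunks, ih]
      · simp only [Bool.not_eq_true] at hp
        simp [pvALoop, h, hp, ih]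
    · simp only [Bool.not_eq_true] at h
      simp [pvALoop, h, pvChunks]

theorem pvRstrip_space (y : List Char) :
    PySem.Chars.rstrip (y ++ [' ']) = PySem.Chars.rstrip y := by
  simp [PySem.Chars.rstrip, PySem.Chars.isspace]

theorem pvStrip_space (x : List Char) :
    PySem.Chars.strip (x ++ [' ']) = PySem.Chars.strip x := by
  simp only [PySem.Chars.strip, PySem.Chars.lstrip, List.dropWhile_append]
  by_cases h : (List.dropWhile PySem.Chars.isspace x).isEmpty = true
  · simp [PySem.Chars.isspace, List.isEmpty_iff.mp h, PySem.Chars.rstrip]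
  · simp [h, pvRstrip_space]

theorem pvChunks_eq (w : String) (t : List String) :
    pvChunks (w :: t) = PySem.Chars.join [' '] ((w :: t).map String.toList) ++ [' '] := by
  induction t generalizing w with
  | nil => simp [pvChunks, PySem.Chars.join_singleton]
  | cons v t ih =>
    rw [List.map_cons, List.map_cons, PySem.Chars.join_cons_cons]
    have h1 : pvChunks (w :: v :: t) = w.toList ++ [' '] ++ pvChunks (v :: t) := by
      simp [pvChunks]
    rw [h1, ih v]
    simp

theorem pvChunks_join (l : List String) :
    PySem.Chars.strip (pvChunks l) =
      PySem.Chars.strip (PySem.Chars.join [' '] (l.map String.toList)) := by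
  cases l with
  | nil => rfl
  | cons w t => rw [pvChunks_eq, pvStrip_space]

-- moving takeWhile/filter through the 'map String.ofList' of A's word list
theorem pvKept_map (sp : List (List Char)) :
    ((sp.map String.ofList).takeWhile pvPred).filter pvNotParen = (pvKept sp).map String.ofList := by
  rw [pvKept, List.takeWhile_map, List.filter_map]
  rfl

-- ===== VERDICT (by name: the statement is the Claim_ definition above) =====
theorem get_selfcheck_topic_spec : Claim_equal_get_selfcheck_topic := by
  intro dp _hdom hpre
  unfold Spec_get_selfcheck_topic get_selfcheck_topic get_selfcheck_topic_alt
  obtain ⟨hc, -⟩ := hpre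
  rw [PySem.Dict.contains_eq_isSome_get?] at hc
  cases hg : (PySem.Dict.mk dp).get? "wiki_bio_text" with
  | none => rw [hg] at hc
  | some s =>
    simp only
    have hsplit : (PySem.Str.split? s " ").getD [] = (pvSplitSp s.toList).map String.ofList := by
      rw [PySem.Str.split?, PySem.Chars.split?]
      simp [pvSplitOn_eq]
    rw [hsplit, pvALoop_eq, List.nil_append, pvKept_map,
      pvBGo_spec s.toList [] [] (by simp), List.nil_append]
    have h2 := pvChunks_join ((pvKept (pvSplitSp s.toList)).map String.ofList)
    rw [PySem.Str.strip, PySem.Str.strip, PySem.Str.join]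
    simp only [String.toList_ofList]
    rw [show (" " : String).toList = [' '] from rfl, h2]
    simp [Function.comp_def]
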